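-- pv_equiv track=rewrite | github.com/Igor-Zwirtes/prog1 | lista8/lista8.py | shop
-- ===== SOURCE A (Python) =====
-- def shop(n, K, N):
--     total = 0
--     buyed = []
--     # Para cada elemento da lista N, verifica se o tipo atual está entre os últimos k itens comprados
--     # Enquanto K for maior que a quantidade de itens comprados, verifica todos os itens já comprados
--     for d in range(n):
--         buy = True
--         for i in range(min(K, len(buyed))):
--             if N[d] == buyed[-i-1]:
--                 buy = False
--         if buy:
--             total += 1
--             buyed.append(N[d])
--     return total
-- ===== SOURCE B (Python) =====
-- def shop(n, K, N):
--     # O(n): remember, per type, the buy-rank of its most recent purchase;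
--     # the type is among the last K bought iff that rank is >= total - K.
--     last = {}
--     total = 0
--     for d in range(n):
--         x = N[d]
--         r = last.get(x)
--         if r is None or r < total - K:
--             last[x] = total
--             total += 1
--     return total
-- ===== Notes on version B (the rewrite author's own statement) =====
-- stated objective: faster
-- what changed: A rescans up to K recent purchases per item; B keeps a dict mapping each type to the buy rank of its most recent purchase and buys iff that rank is absent or older than total-K, one O(1) dict step per item.
import Mathlib
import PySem

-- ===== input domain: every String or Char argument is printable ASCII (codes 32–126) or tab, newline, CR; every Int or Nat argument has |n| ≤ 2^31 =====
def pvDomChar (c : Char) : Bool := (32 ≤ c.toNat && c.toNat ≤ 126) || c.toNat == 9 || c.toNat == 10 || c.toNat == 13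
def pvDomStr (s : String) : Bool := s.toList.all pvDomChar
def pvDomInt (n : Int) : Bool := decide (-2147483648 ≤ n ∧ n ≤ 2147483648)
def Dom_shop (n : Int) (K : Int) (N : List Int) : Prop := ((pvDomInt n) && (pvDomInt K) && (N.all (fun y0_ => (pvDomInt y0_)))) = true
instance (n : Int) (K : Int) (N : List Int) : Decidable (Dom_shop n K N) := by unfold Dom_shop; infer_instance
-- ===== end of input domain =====

-- B replaces A's rescan of the last K purchases by a dict of each type's most recent buy rank (alternative single-pass algorithm).


-- ===== PORT A =====
-- inner loop of A: the 'buy' flag after checking buyed[-i-1] for i in range(min(K, len(buyed)))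
def shopBuy (x : Int) (buyed : List Int) (K : Int) : Bool :=
  (PySem.List.pyRange 0 (min K (buyed.length : Int)) 1).foldl
    (fun buy i => if x == PySem.List.pyGetD buyed (-i - 1) 0 then false else buy) true

-- loop body of A over the state (total, buyed)
def shopStep (N : List Int) (K : Int) (st : Int × List Int) (d : Int) : Int × List Int :=
  let x := PySem.List.pyGetD N d 0
  if shopBuy x st.2 K then (st.1 + 1, st.2 ++ [x]) else st

def shop (n : Int) (K : Int) (N : List Int) : Int :=
  ((PySem.List.pyRange 0 n 1).foldl (shopStep N K) (0, [])).1

-- ===== PORT B =====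
-- loop body of B over the state (last, total): 'last' maps a type to the buy rank of its most recent purchase
def shopAltStep (N : List Int) (K : Int) (st : PySem.Dict Int Int × Int) (d : Int) :
    PySem.Dict Int Int × Int :=
  let x := PySem.List.pyGetD N d 0
  match st.1.get? x with
  | none => (st.1.insert x st.2, st.2 + 1)
  | some r => if r < st.2 - K then (st.1.insert x st.2, st.2 + 1) else st

def shop_alt (n : Int) (K : Int) (N : List Int) : Int :=
  ((PySem.List.pyRange 0 n 1).foldl (shopAltStep N K) (PySem.Dict.empty, 0)).2

-- ===== PRECONDITION & SPEC =====
-- Pre_ excludes exactly the inputs where Python A raises IndexError: N[d] with n exceeding len(N).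
def Pre_shop (n : Int) (K : Int) (N : List Int) : Prop := n ≤ (N.length : Int)
instance (n : Int) (K : Int) (N : List Int) : Decidable (Pre_shop n K N) := by unfold Pre_shop; infer_instance

def pvWitness_shop : Int × Int × List Int := (4, 2, [5, 5, 7, 5])

def Spec_shop (n : Int) (K : Int) (N : List Int) (out : Int) : Prop := out = shop_alt n K N
instance (n : Int) (K : Int) (N : List Int) (out : Int) : Decidable (Spec_shop n K N out) := by unfold Spec_shop; infer_instance

-- ===== CLAIM (what is proved, stated in full; the proofs are below) =====
def Claim_equal_shop : Prop := ∀ (n : Int) (K : Int) (N : List Int), Dom_shop n K N → Pre_shop n K N → Spec_shop n K N (shop n K N)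

-- ===== LEMMAS AND PROOFS =====

-- index (as an Int) of the LAST occurrence of x in l, if any
def lastIdxI : List Int → Int → Option Int
  | [], _ => none
  | a :: l, x =>
    match lastIdxI l x with
    | some r => some (r + 1)
    | none => if a = x then some 0 else none

lemma lastIdxI_append (l : List Int) (x y : Int) :
    lastIdxI (l ++ [x]) y = if y = x then some (l.length : Int) else lastIdxI l y := by
  induction l with
  | nil =>
    by_cases h : y = x
    · simp [lastIdxI, h]
    · simp [lastIdxI, h]; intro h'; exact (h h'.symm).elim
  | cons a l ih =>
    simp only [List.cons_append, lastIdxI, ih]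
    by_cases h : y = x
    · simp only [h, if_pos rfl]
      push_cast
      simp [add_comm]
    · simp only [if_neg h]

lemma lastIdxI_none (l : List Int) (x : Int) : lastIdxI l x = none ↔ x ∉ l := by
  induction l with
  | nil => simp [lastIdxI]
  | cons a l ih =>
    simp only [lastIdxI, List.mem_cons]
    rcases h : lastIdxI l x with _ | r
    · have hx : x ∉ l := ih.mp h
      by_cases ha : a = x
      · simp [ha]
      · simp [ha, hx]; exact fun h' => ha h'.symm
    · simp only []
      constructor
      · intro h'; simp at h'
      · intro h'
        exact absurd (ih.mpr (fun hm => h' (Or.inr hm))) (by simp [h])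

lemma lastIdxI_some (l : List Int) (x r : Int) (h : lastIdxI l x = some r) :
    ∃ j : Nat, (j : Int) = r ∧ ∃ hj : j < l.length, l[j] = x ∧
      ∀ j' : Nat, j < j' → ∀ hj' : j' < l.length, l[j'] ≠ x := by
  induction l generalizing r with
  | nil => simp [lastIdxI] at h
  | cons a l ih =>
    simp only [lastIdxI] at h
    rcases h' : lastIdxI l x with _ | r0
    · rw [h'] at h
      by_cases ha : a = x
      · simp [ha] at h
        refine ⟨0, by omega, by simp, ha, ?_⟩
        intro j' hj' hlt
        have : x ∉ l := (lastIdxI_none l x).mp h'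
        cases j' with
        | zero => omega
        | succ j =>
          simp only [List.getElem_cons_succ]
          intro hx
          exact this (hx ▸ List.getElem_mem _)
      · simp [ha] at h
    · rw [h'] at h
      simp only [Option.some.injEq] at h
      obtain ⟨j, hjr, hj, hx, hmax⟩ := ih r0 h'
      refine ⟨j + 1, by omega, by simpa using hj, by simpa using hx, ?_⟩
      intro j' hlt hj'
      cases j' with
      | zero => omega
      | succ j'' =>
        have := hmax j'' (by omega) (by simpa using hj')
        simpa using this

lemma foldl_ifFalse (p : Int → Bool) (l : List Int) (b : Bool) :
    l.foldl (fun acc i => if p i then false else acc) b = (b && l.all (fun i => !p i)) := by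
  induction l generalizing b with
  | nil => simp
  | cons a l ih =>
    rw [List.foldl_cons, show (if p a = true then false else b) = (b && !p a) by
      cases h : p a <;> simp, ih, List.all_cons, Bool.and_assoc]

lemma shopBuy_iff (x : Int) (buyed : List Int) (K : Int) :
    shopBuy x buyed K = true ↔
      ∀ j : Nat, (hj : j < buyed.length) → (buyed.length : Int) - K ≤ (j : Int) →
        buyed[j] ≠ x := by
  unfold shopBuy
  rw [foldl_ifFalse]
  simp only [Bool.true_and, List.all_eq_true, PySem.List.mem_pyRange_one, Bool.not_eq_eq_eq_not,
    Bool.not_true, beq_eq_false_iff_ne, ne_eq]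
  constructor
  · intro H j hj hK
    have hk1 : 0 < buyed.length - j := by omega
    have hk2 : buyed.length - j ≤ buyed.length := by omega
    have hH := H ((buyed.length : Int) - (j : Int) - 1)
      ⟨by omega, lt_min_iff.mpr ⟨by omega, by omega⟩⟩
    rw [show -((buyed.length : Int) - (j : Int) - 1) - 1 = -((buyed.length - j : Nat) : Int) by
      omega] at hH
    rw [PySem.List.pyGetD_neg_natCast buyed _ 0 hk1 hk2] at hH
    simp only [show buyed.length - (buyed.length - j) = j from by omega] at hH
    exact fun h => hH h.symm
  · intro H i hi
    obtain ⟨h0, hi'⟩ := hi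
    have hiK : i < K := lt_of_lt_of_le hi' (min_le_left _ _)
    have hil : i < (buyed.length : Int) := lt_of_lt_of_le hi' (min_le_right _ _)
    have hk1 : 0 < i.toNat + 1 := by omega
    have hk2 : i.toNat + 1 ≤ buyed.length := by omega
    rw [show (-i - 1) = -(((i.toNat + 1 : Nat)) : Int) by omega]
    rw [PySem.List.pyGetD_neg_natCast buyed _ 0 hk1 hk2]
    have hH := H (buyed.length - (i.toNat + 1)) (by omega) (by omega)
    exact fun h => hH h.symm

lemma shopBuy_eq (x : Int) (buyed : List Int) (K : Int) :
    shopBuy x buyed K = (match lastIdxI buyed x with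
      | none => true
      | some r => decide (r < (buyed.length : Int) - K)) := by
  rcases h : lastIdxI buyed x with _ | r
  · rw [shopBuy_iff]
    intro j hj _ hx
    exact (lastIdxI_none buyed x).mp h (hx ▸ List.getElem_mem hj)
  · obtain ⟨j0, hj0r, hj0, hx0, hmax⟩ := lastIdxI_some buyed x r h
    by_cases hr : r < (buyed.length : Int) - K
    · simp only [hr, decide_true]
      rw [shopBuy_iff]
      intro j hj hK hx
      exact hmax j (by omega) hj hx
    · simp only [hr, decide_false]
      cases hb : shopBuy x buyed K with
      | false => rfl
      | true => exact absurd hx0 ((shopBuy_iff x buyed K).mp hb j0 hj0 (by omega))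

lemma main_loop (ds : List Int) (N : List Int) (K : Int) :
    ∀ (buyed : List Int) (last : PySem.Dict Int Int),
      (∀ y, last.get? y = lastIdxI buyed y) →
      ((ds.foldl (shopAltStep N K) (last, (buyed.length : Int))).2 =
        (ds.foldl (shopStep N K) ((buyed.length : Int), buyed)).1) := by
  induction ds with
  | nil => intro buyed last h; simp
  | cons d ds ih =>
    intro buyed last h
    simp only [List.foldl_cons]
    have hlen : ((buyed ++ [PySem.List.pyGetD N d 0]).length : Int) = (buyed.length : Int) + 1 := by
      simp
    have hinv : ∀ y, (last.insert (PySem.List.pyGetD N d 0) (buyed.length : Int)).get? y =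
        lastIdxI (buyed ++ [PySem.List.pyGetD N d 0]) y := by
      intro y
      rw [PySem.Dict.get?_insert, lastIdxI_append, h y]
    rcases hL : lastIdxI buyed (PySem.List.pyGetD N d 0) with _ | r
    · have hbuy : shopBuy (PySem.List.pyGetD N d 0) buyed K = true := by rw [shopBuy_eq, hL]
      rw [show shopAltStep N K (last, (buyed.length : Int)) d =
          (last.insert (PySem.List.pyGetD N d 0) (buyed.length : Int), (buyed.length : Int) + 1) from by
        simp [shopAltStep, h _, hL]]
      rw [show shopStep N K ((buyed.length : Int), buyed) d =
          ((buyed.length : Int) + 1, buyed ++ [PySem.List.pyGetD N d 0]) from by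
        simp [shopStep, hbuy]]
      rw [← hlen]
      exact ih _ _ hinv
    · by_cases hr : r < (buyed.length : Int) - K
      · have hbuy : shopBuy (PySem.List.pyGetD N d 0) buyed K = true := by
          rw [shopBuy_eq, hL]; simpa using hr
        rw [show shopAltStep N K (last, (buyed.length : Int)) d =
            (last.insert (PySem.List.pyGetD N d 0) (buyed.length : Int), (buyed.length : Int) + 1) from by
          simp [shopAltStep, h _, hL, hr]]
        rw [show shopStep N K ((buyed.length : Int), buyed) d =
            ((buyed.length : Int) + 1, buyed ++ [PySem.List.pyGetD N d 0]) from by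
          simp [shopStep, hbuy]]
        rw [← hlen]
        exact ih _ _ hinv
      · have hbuy : shopBuy (PySem.List.pyGetD N d 0) buyed K = false := by
          rw [shopBuy_eq, hL]; simpa using hr
        rw [show shopAltStep N K (last, (buyed.length : Int)) d = (last, (buyed.length : Int)) from by
          simp [shopAltStep, h _, hL, hr]]
        rw [show shopStep N K ((buyed.length : Int), buyed) d = ((buyed.length : Int), buyed) from by
          simp [shopStep, hbuy]]
        exact ih _ _ h

-- ===== VERDICT (by name: the statement is the Claim_ definition above) =====
theorem shop_spec : Claim_equal_shop := by
  intro n K N _ _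
  unfold Spec_shop shop shop_alt
  have := main_loop (PySem.List.pyRange 0 n 1) N K [] PySem.Dict.empty
    (by intro y; simp [PySem.Dict.get?_empty, lastIdxI])
  simpa using this.symm
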